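-- pv_equiv track=rewrite | github.com/blender/blender | release/scripts/addons/sverchok-master/nodes/generators_extended/ring.py | ring_polygons
-- ===== SOURCE A (Python) =====
-- def ring_polygons(N1, N2):
--     '''
--         N1 : major sections - number of RADIAL sections
--         N2 : minor sections - number of CIRCULAR sections
--     '''
--     listPolys = []
--     for n1 in range(N1 - 1):
--         for n2 in range(N2 - 1):
--             listPolys.append([N2 * n1 + n2, N2 * (n1 + 1) + n2, N2 * (n1 + 1) + n2 + 1, N2 * n1 + n2 + 1])
--
--     for n2 in range(N2 - 1):
--         listPolys.append([N2 * (N1 - 1) + n2, n2, n2 + 1, N2 * (N1 - 1) + n2 + 1])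
--
--     return listPolys
-- ===== SOURCE B (Python) =====
-- def ring_polygons(N1, N2):
--     pairs = [(N2 * n1, N2 * (n1 + 1)) for n1 in range(N1 - 1)]
--     pairs.append((N2 * (N1 - 1), 0))
--     return [[a + n2, b + n2, b + n2 + 1, a + n2 + 1]
--             for (a, b) in pairs
--             for n2 in range(N2 - 1)]
-- ===== Notes on version B (the rewrite author's own statement) =====
-- stated objective: alternative
-- what changed: B precomputes a list of (row-offset, next-row-offset) pairs, with the wrap pair appended unconditionally, and generates all quads in one uniform pass over that table, instead of A's two separate nested loops with repeated index arithmetic.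
import Mathlib
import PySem

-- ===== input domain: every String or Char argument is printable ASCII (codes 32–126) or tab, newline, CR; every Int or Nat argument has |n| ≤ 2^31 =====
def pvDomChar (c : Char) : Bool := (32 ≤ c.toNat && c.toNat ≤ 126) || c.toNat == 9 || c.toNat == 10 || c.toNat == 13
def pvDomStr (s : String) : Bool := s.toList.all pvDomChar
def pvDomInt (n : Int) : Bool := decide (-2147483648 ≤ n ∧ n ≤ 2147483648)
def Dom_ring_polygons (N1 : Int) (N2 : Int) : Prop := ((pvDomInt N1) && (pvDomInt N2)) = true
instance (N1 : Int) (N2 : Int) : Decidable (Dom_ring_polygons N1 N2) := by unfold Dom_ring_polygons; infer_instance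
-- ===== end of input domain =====

-- ===== PORT A =====
-- B builds a row-offset pair table and one uniform quad loop instead of A's two nested loops (alternative decomposition, same cost).
def ring_polygons (N1 : Int) (N2 : Int) : List (List Int) :=
  let l1 := (PySem.List.pyRange 0 (N1 - 1) 1).foldl (fun acc n1 =>
    (PySem.List.pyRange 0 (N2 - 1) 1).foldl (fun acc n2 =>
      acc ++ [[N2 * n1 + n2, N2 * (n1 + 1) + n2, N2 * (n1 + 1) + n2 + 1, N2 * n1 + n2 + 1]]) acc) []
  (PySem.List.pyRange 0 (N2 - 1) 1).foldl (fun acc n2 =>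
    acc ++ [[N2 * (N1 - 1) + n2, n2, n2 + 1, N2 * (N1 - 1) + n2 + 1]]) l1

-- ===== PORT B =====
def ring_polygons_alt (N1 : Int) (N2 : Int) : List (List Int) :=
  let pairs := ((PySem.List.pyRange 0 (N1 - 1) 1).map (fun n1 => (N2 * n1, N2 * (n1 + 1))))
      ++ [(N2 * (N1 - 1), 0)]
  pairs.flatMap (fun ab =>
    (PySem.List.pyRange 0 (N2 - 1) 1).map (fun n2 =>
      [ab.1 + n2, ab.2 + n2, ab.2 + n2 + 1, ab.1 + n2 + 1]))

-- ===== PRECONDITION & SPEC =====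
def Spec_ring_polygons (N1 : Int) (N2 : Int) (out : List (List Int)) : Prop := out = ring_polygons_alt N1 N2
instance (N1 : Int) (N2 : Int) (out : List (List Int)) : Decidable (Spec_ring_polygons N1 N2 out) := by unfold Spec_ring_polygons; infer_instance

-- ===== CLAIM (what is proved, stated in full; the proofs are below) =====
def Claim_equal_ring_polygons : Prop := ∀ (N1 : Int) (N2 : Int), Dom_ring_polygons N1 N2 → Spec_ring_polygons N1 N2 (ring_polygons N1 N2)

-- ===== LEMMAS AND PROOFS =====

-- ===== VERDICT (by name: the statement is the Claim_ definition above) =====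
theorem ring_polygons_spec : Claim_equal_ring_polygons := by
  intro N1 N2 _
  unfold Spec_ring_polygons ring_polygons ring_polygons_alt
  simp only [PySem.List.foldl_append_singleton_eq_map, PySem.List.foldl_append_eq_flatMap,
    List.flatMap_append, List.flatMap_map, List.flatMap_cons, List.flatMap_nil,
    List.append_nil, List.nil_append, zero_add]
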